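-- pv_equiv track=rewrite | github.com/Aliezzz/COHF | COHF/dataloader.py | reindex_labels
-- ===== SOURCE A (Python) =====
-- def reindex_labels(nodes, classes, labels):
--     label_dict = {}
--     for label in classes:
--         label_dict[label] = len(label_dict)
--
--     # group nodes with new label
--     label_index = [[] for _ in label_dict.keys()]
--     for node_idx in range(len(nodes)):
--         if labels[node_idx] in label_dict.keys():
--             label_index[label_dict[labels[node_idx]]].append(nodes[node_idx])
--     return label_index
-- ===== SOURCE B (Python) =====
-- def reindex_labels(nodes, classes, labels):
--     label_dict = {}
--     for label in classes:
--         label_dict[label] = len(label_dict)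
--     return [[nodes[i] for i in range(len(nodes))
--              if label_dict.get(labels[i]) == j]
--             for j in range(len(label_dict))]
-- ===== Notes on version B (the rewrite author's own statement) =====
-- stated objective: alternative
-- what changed: B keeps A's label->index dict but replaces the preallocate-then-scatter pass (one loop over nodes mutating buckets in place) by a pure per-bucket gather: for each bucket index j it collects, with a list comprehension, the nodes whose looked-up index equals j.
import Mathlib
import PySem

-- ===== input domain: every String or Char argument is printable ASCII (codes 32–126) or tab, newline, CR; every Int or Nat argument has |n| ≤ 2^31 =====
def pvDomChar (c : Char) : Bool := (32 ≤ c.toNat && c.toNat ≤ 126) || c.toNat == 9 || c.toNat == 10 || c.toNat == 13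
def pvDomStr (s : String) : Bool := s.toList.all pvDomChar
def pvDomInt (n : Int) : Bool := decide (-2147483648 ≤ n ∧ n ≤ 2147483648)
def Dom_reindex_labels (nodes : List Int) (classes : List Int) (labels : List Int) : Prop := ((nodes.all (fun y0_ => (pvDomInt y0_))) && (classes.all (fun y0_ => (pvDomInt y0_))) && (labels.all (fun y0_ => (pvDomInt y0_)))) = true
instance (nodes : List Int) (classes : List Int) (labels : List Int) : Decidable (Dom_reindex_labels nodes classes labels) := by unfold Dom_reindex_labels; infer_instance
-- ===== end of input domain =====

-- B keeps A's label->index dict but replaces the preallocate-then-scatter pass (one loop over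
-- nodes mutating buckets in place) by a pure per-bucket gather: one comprehension per bucket.

-- ===== PORT A =====
-- label_dict = {}; for label in classes: label_dict[label] = len(label_dict)
-- (first loop of A; B's Python begins with the identical loop, so both ports share this helper)
def pvBuildDict (classes : List Int) : PySem.Dict Int Int :=
  classes.foldl (fun d label => d.insert label (Int.ofNat d.size)) PySem.Dict.empty

def reindex_labels (nodes : List Int) (classes : List Int) (labels : List Int) : List (List Int) :=
  let label_dict := pvBuildDict classes
  -- label_index = [[] for _ in label_dict.keys()]
  let label_index : List (List Int) := label_dict.keys.map (fun _ => ([] : List Int))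
  -- for node_idx in range(len(nodes)):
  --   if labels[node_idx] in label_dict.keys(): label_index[label_dict[labels[node_idx]]].append(nodes[node_idx])
  -- (indexing is total here via pyGetD/getD/set; in range on Pre_, where Python raises no IndexError)
  (PySem.List.pyRange 0 nodes.length 1).foldl
    (fun li node_idx =>
      if label_dict.contains (PySem.List.pyGetD labels node_idx 0) then
        li.set (label_dict.getD (PySem.List.pyGetD labels node_idx 0) 0).toNat
          (li.getD (label_dict.getD (PySem.List.pyGetD labels node_idx 0) 0).toNat []
            ++ [PySem.List.pyGetD nodes node_idx 0])
      else li)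
    label_index

-- ===== PORT B =====
-- label_dict built by the same first loop; then:
-- return [[nodes[i] for i in range(len(nodes)) if label_dict.get(labels[i]) == j]
--         for j in range(len(label_dict))]
def reindex_labels_alt (nodes : List Int) (classes : List Int) (labels : List Int) : List (List Int) :=
  let label_dict := pvBuildDict classes
  (PySem.List.pyRange 0 label_dict.size 1).map (fun j =>
    ((PySem.List.pyRange 0 nodes.length 1).filter
        (fun i => label_dict.get? (PySem.List.pyGetD labels i 0) == some j)).map
      (fun i => PySem.List.pyGetD nodes i 0))

-- ===== PRECONDITION & SPEC =====
-- position of the LAST occurrence of l in classes (input-shape helper used only by Pre_)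
def pvLast (classes : List Int) (l : Int) : Nat := classes.length - 1 - classes.reverse.idxOf l

-- Pre_ is exactly the inputs on which A returns: it excludes inputs with fewer labels than nodes
-- (A raises IndexError reading labels[node_idx]) and inputs where some node's label is a duplicated
-- class after whose last occurrence no new distinct class appears — there A's reassigned index
-- len(label_dict) equals the bucket count and label_index[...] raises IndexError.
def Pre_reindex_labels (nodes : List Int) (classes : List Int) (labels : List Int) : Prop :=
  nodes.length ≤ labels.length ∧
  ∀ l ∈ labels.take nodes.length, l ∈ classes → 1 < classes.count l →
    (PySem.List.dedup (classes.take (pvLast classes l + 1))).length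
      < (PySem.List.dedup classes).length

instance (nodes : List Int) (classes : List Int) (labels : List Int) : Decidable (Pre_reindex_labels nodes classes labels) := by
  unfold Pre_reindex_labels; infer_instance

def pvWitness_reindex_labels : List Int × List Int × List Int := ([1, 2, 3], [10, 20], [10, 20, 10])

def Spec_reindex_labels (nodes : List Int) (classes : List Int) (labels : List Int) (out : List (List Int)) : Prop := out = reindex_labels_alt nodes classes labels
instance (nodes : List Int) (classes : List Int) (labels : List Int) (out : List (List Int)) : Decidable (Spec_reindex_labels nodes classes labels out) := by unfold Spec_reindex_labels; infer_instance

-- ===== CLAIM (what is proved, stated in full; the proofs are below) =====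
def Claim_equal_reindex_labels : Prop := ∀ (nodes : List Int) (classes : List Int) (labels : List Int), Dom_reindex_labels nodes classes labels → Pre_reindex_labels nodes classes labels → Spec_reindex_labels nodes classes labels (reindex_labels nodes classes labels)

-- ===== LEMMAS AND PROOFS =====

-- keys of the dict built by the first loop = distinct classes in first-occurrence order
theorem pvBuildDict_keys (classes : List Int) :
    (pvBuildDict classes).keys = PySem.List.dedup classes := by
  unfold pvBuildDict
  rw [PySem.Dict.keys_foldl_insert]
  simp [PySem.Set.update_nil_left, PySem.List.dedup_eq_ofList]

-- appending elements one of which is new strictly grows the distinct count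
theorem pvDedup_lt (xs ys : List Int) (c : Int) (hc : c ∈ ys) (hnc : c ∉ xs) :
    (PySem.List.dedup xs).length < (PySem.List.dedup (xs ++ ys)).length := by
  simp only [PySem.List.dedup_eq_ofList]
  rw [PySem.Set.ofList_append, PySem.Set.update_eq_append_filter, List.length_append]
  have hmem : c ∈ (PySem.Set.ofList ys).filter
      (fun y => !(PySem.Set.contains (PySem.Set.ofList xs) y)) := by
    rw [List.mem_filter]
    exact ⟨(PySem.Set.mem_ofList _ _).mpr hc, by simpa using hnc⟩
  have := List.length_pos_of_mem hmem
  omega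

-- properties of the last occurrence
theorem pvLast_lt (classes : List Int) (l : Int) (hmem : l ∈ classes) :
    pvLast classes l < classes.length := by
  have h1 : classes.reverse.idxOf l < classes.length := by
    have := List.idxOf_lt_length_of_mem (List.mem_reverse.mpr hmem)
    simpa using this
  unfold pvLast
  omega

theorem pvLast_getElem (classes : List Int) (l : Int) (hmem : l ∈ classes) :
    classes[pvLast classes l]'(pvLast_lt classes l hmem) = l := by
  have hmr : l ∈ classes.reverse := List.mem_reverse.mpr hmem
  have hi : classes.reverse.idxOf l < classes.reverse.length := List.idxOf_lt_length_of_mem hmr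
  have hrev := List.getElem_reverse (l := classes)
      (i := classes.reverse.idxOf l) (by simpa using hi)
  have hix := List.getElem_idxOf hi
  rw [hix] at hrev
  exact hrev.symm

-- value stored for l = number of distinct classes seen strictly before l's last occurrence
theorem pvBuildDict_getD_last (classes : List Int) (l : Int) (hmem : l ∈ classes) :
    (pvBuildDict classes).getD l 0
      = ((PySem.List.dedup (classes.take (pvLast classes l))).length : Int) := by
  induction classes using List.reverseRecOn with
  | nil => simp at hmem
  | append_singleton cs a ih =>
    have hfold : pvBuildDict (cs ++ [a])
        = (pvBuildDict cs).insert a (Int.ofNat (pvBuildDict cs).size) := by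
      simp [pvBuildDict, List.foldl_append]
    have hsize : (pvBuildDict cs).size = (PySem.List.dedup cs).length := by
      have h1 : (pvBuildDict cs).keys.length = (pvBuildDict cs).size := by
        simp [PySem.Dict.keys, PySem.Dict.size]
      rw [← h1, pvBuildDict_keys]
    by_cases hla : l = a
    · subst hla
      have hlastv : pvLast (cs ++ [l]) l = cs.length := by
        unfold pvLast
        rw [List.reverse_append]
        simp
      rw [hfold, PySem.Dict.getD_insert_self, hsize, hlastv, List.take_left]
      rfl
    · have hmem' : l ∈ cs := by
        rcases List.mem_append.mp hmem with h | h
        · exact h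
        · simp at h; exact absurd h hla
      have hrl : l ∈ cs.reverse := List.mem_reverse.mpr hmem'
      have hidx : cs.reverse.idxOf l < cs.length := by
        have := List.idxOf_lt_length_of_mem hrl
        simpa using this
      have hlastv : pvLast (cs ++ [a]) l = pvLast cs l := by
        unfold pvLast
        rw [List.reverse_append]
        simp only [List.reverse_singleton, List.singleton_append, List.length_append,
          List.length_singleton]
        rw [List.idxOf_cons_ne _ (fun h => hla (by simpa using h.symm))]
        omega
      have hple : pvLast cs l ≤ cs.length := by unfold pvLast; omega
      rw [hfold, PySem.Dict.getD_insert, if_neg hla, hlastv,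
        List.take_append_of_le_length hple]
      exact ih hmem'

-- on Pre_, the stored index of every looked-up label is within the bucket count
theorem pvIdx_lt (classes : List Int) (l : Int) (hmem : l ∈ classes)
    (hok : classes.count l ≤ 1 ∨
      (PySem.List.dedup (classes.take (pvLast classes l + 1))).length
        < (PySem.List.dedup classes).length) :
    (PySem.List.dedup (classes.take (pvLast classes l))).length
      < (PySem.List.dedup classes).length := by
  have hp := pvLast_lt classes l hmem
  have hpe := pvLast_getElem classes l hmem
  rcases hok with hcnt | hgap
  · -- l occurs once: l is not in the prefix before its (unique) occurrence
    have hcnt1 : classes.count l = 1 := by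
      have := List.count_pos_iff.mpr hmem
      omega
    have hsplit : classes = classes.take (pvLast classes l) ++ classes.drop (pvLast classes l) :=
      (List.take_append_drop _ _).symm
    have hdropmem : l ∈ classes.drop (pvLast classes l) := by
      rw [List.drop_eq_getElem_cons hp, hpe]
      exact List.mem_cons_self
    have hnottake : l ∉ classes.take (pvLast classes l) := by
      intro hmt
      have h1 : 1 ≤ (classes.take (pvLast classes l)).count l := List.count_pos_iff.mpr hmt
      have h2 : 1 ≤ (classes.drop (pvLast classes l)).count l := List.count_pos_iff.mpr hdropmem
      have h3 : classes.count l
          = (classes.take (pvLast classes l)).count l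
            + (classes.drop (pvLast classes l)).count l := by
        conv_lhs => rw [hsplit]
        rw [List.count_append]
      omega
    calc (PySem.List.dedup (classes.take (pvLast classes l))).length
        < (PySem.List.dedup (classes.take (pvLast classes l)
            ++ classes.drop (pvLast classes l))).length :=
          pvDedup_lt _ _ l hdropmem hnottake
      _ = (PySem.List.dedup classes).length := by rw [← hsplit]
  · -- duplicated but a new distinct class appears after the last occurrence
    have hstep : classes.take (pvLast classes l + 1)
        = classes.take (pvLast classes l) ++ [l] := by
      rw [List.take_add_one, List.getElem?_eq_getElem hp, hpe]
      rfl
    have hle : (PySem.List.dedup (classes.take (pvLast classes l))).length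
        ≤ (PySem.List.dedup (classes.take (pvLast classes l + 1))).length := by
      rw [hstep]
      simp only [PySem.List.dedup_eq_ofList]
      rw [PySem.Set.ofList_append_singleton, PySem.Set.add_eq_ite]
      split
      · exact le_refl _
      · simp
    omega

-- generic form of A's second loop: appending at computed positions, read off position j
theorem pvScatter (is : List Int) (li : List (List Int))
    (cond : Int → Bool) (pos : Int → Nat) (val : Int → Int) (j : Nat)
    (hpos : ∀ i ∈ is, cond i = true → pos i < li.length) :
    ((is.foldl (fun acc i =>
        if cond i then acc.set (pos i) (acc.getD (pos i) [] ++ [val i]) else acc) li)[j]?)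
      = (li[j]?).map
          (· ++ ((is.filter (fun i => cond i && (pos i == j))).map val)) := by
  induction is generalizing li with
  | nil => simp
  | cons i is ih =>
    simp only [List.foldl_cons, List.filter_cons]
    by_cases hc : cond i = true
    · have hlt : pos i < li.length := hpos i (by simp) hc
      rw [if_pos hc]
      set li' := li.set (pos i) (li.getD (pos i) [] ++ [val i]) with hli'
      have hpos' : ∀ i' ∈ is, cond i' = true → pos i' < li'.length := by
        intro i' h1 h2
        simpa [hli'] using hpos i' (by simp [h1]) h2
      rw [ih li' hpos']
      by_cases hj : pos i = j
      · have : li'[j]? = some (li.getD j [] ++ [val i]) := by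
          rw [hli', ← hj, List.getElem?_set_self]
          simp [hlt]
        rw [this, List.getElem?_eq_getElem (hj ▸ hlt)]
        simp [hc, hj, List.getD_eq_getElem?_getD, List.getElem?_eq_getElem (hj ▸ hlt)]
      · have heq : li'[j]? = li[j]? := by
          rw [hli', List.getElem?_set_ne hj]
        rw [heq]
        have : (pos i == j) = false := by simp [hj]
        simp [hc, this]
    · rw [if_neg hc]
      rw [ih li (fun i' h1 h2 => hpos i' (by simp [h1]) h2)]
      simp [hc]

-- ===== VERDICT (by name: the statement is the Claim_ definition above) =====
theorem reindex_labels_spec : Claim_equal_reindex_labels := by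
  intro nodes classes labels _ hpre
  unfold Spec_reindex_labels
  obtain ⟨hlen, hdup⟩ := hpre
  -- every label read by the loop, if present in the dict, has a stored index below the bucket count
  have hlt : ∀ i ∈ PySem.List.pyRange 0 nodes.length 1,
      (pvBuildDict classes).contains (PySem.List.pyGetD labels i 0) = true →
      ((pvBuildDict classes).getD (PySem.List.pyGetD labels i 0) 0).toNat
        < (PySem.List.dedup classes).length := by
    intro i hi hc
    obtain ⟨h0, h1⟩ := PySem.List.mem_pyRange_one.mp hi
    have hil : i.toNat < labels.length := by omega
    have hget : PySem.List.pyGetD labels i 0 = labels[i.toNat] :=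
      PySem.List.pyGetD_eq_getElem labels 0 h0 (by exact_mod_cast (by omega : i < (labels.length : Int)))
    have htk : labels[i.toNat] ∈ labels.take nodes.length := by
      have hlt' : i.toNat < (labels.take nodes.length).length := by
        simp [List.length_take]; omega
      have := List.getElem_mem hlt'
      simpa [List.getElem_take] using this
    have hmemk : PySem.List.pyGetD labels i 0 ∈ (pvBuildDict classes).keys :=
      (PySem.Dict.contains_iff_mem_keys _ _).mp hc
    rw [pvBuildDict_keys] at hmemk
    have hmem : PySem.List.pyGetD labels i 0 ∈ classes := (PySem.List.mem_dedup _ _).mp hmemk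
    have hok : classes.count (PySem.List.pyGetD labels i 0) ≤ 1 ∨
        (PySem.List.dedup (classes.take (pvLast classes (PySem.List.pyGetD labels i 0) + 1))).length
          < (PySem.List.dedup classes).length := by
      by_cases hcl : classes.count (PySem.List.pyGetD labels i 0) ≤ 1
      · exact Or.inl hcl
      · exact Or.inr (hdup _ (hget ▸ htk) hmem (by omega))
    have := pvIdx_lt classes _ hmem hok
    rw [pvBuildDict_getD_last classes _ hmem]
    simpa using this
  have hA : reindex_labels nodes classes labels
      = (PySem.List.pyRange 0 nodes.length 1).foldl
          (fun li i =>
            if (pvBuildDict classes).contains (PySem.List.pyGetD labels i 0) then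
              li.set ((pvBuildDict classes).getD (PySem.List.pyGetD labels i 0) 0).toNat
                (li.getD ((pvBuildDict classes).getD (PySem.List.pyGetD labels i 0) 0).toNat []
                  ++ [PySem.List.pyGetD nodes i 0])
            else li)
          ((pvBuildDict classes).keys.map (fun _ => ([] : List Int))) := rfl
  have hB : reindex_labels_alt nodes classes labels
      = (PySem.List.pyRange 0 (pvBuildDict classes).size 1).map (fun j =>
          ((PySem.List.pyRange 0 nodes.length 1).filter
              (fun i => (pvBuildDict classes).get? (PySem.List.pyGetD labels i 0) == some j)).map
            (fun i => PySem.List.pyGetD nodes i 0)) := rfl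
  have hsize : (pvBuildDict classes).size = (PySem.List.dedup classes).length := by
    have h1 : (pvBuildDict classes).keys.length = (pvBuildDict classes).size := by
      simp [PySem.Dict.keys, PySem.Dict.size]
    rw [← h1, pvBuildDict_keys]
  apply List.ext_getElem?
  intro j
  rw [hA, hB, pvScatter (PySem.List.pyRange 0 nodes.length 1)
        ((pvBuildDict classes).keys.map (fun _ => ([] : List Int)))
        (fun i => (pvBuildDict classes).contains (PySem.List.pyGetD labels i 0))
        (fun i => ((pvBuildDict classes).getD (PySem.List.pyGetD labels i 0) 0).toNat)
        (fun i => PySem.List.pyGetD nodes i 0) j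
        (by
          intro i hi hc
          rw [List.length_map, pvBuildDict_keys]
          exact hlt i hi hc)]
  rw [List.getElem?_map, List.getElem?_map, pvBuildDict_keys]
  by_cases hj : j < (PySem.List.dedup classes).length
  · have hjr : (PySem.List.pyRange 0 (pvBuildDict classes).size 1)[j]? = some ((0 : Int) + j) := by
      rw [List.getElem?_eq_getElem (by rw [PySem.List.length_pyRange_one, hsize]; omega)]
      rw [PySem.List.getElem_pyRange_one]
    rw [List.getElem?_eq_getElem hj, hjr]
    simp only [Option.map_some, Option.some.injEq, List.nil_append]
    apply congrArg
    apply List.filter_congr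
    intro i _
    set l := PySem.List.pyGetD labels i 0 with hl
    by_cases hc : (pvBuildDict classes).contains l = true
    · have hmemk : l ∈ (pvBuildDict classes).keys :=
        (PySem.Dict.contains_iff_mem_keys _ _).mp hc
      rw [pvBuildDict_keys] at hmemk
      have hmem : l ∈ classes := (PySem.List.mem_dedup _ _).mp hmemk
      have hget? : (pvBuildDict classes).get? l = some ((pvBuildDict classes).getD l 0) := by
        rcases hx : (pvBuildDict classes).get? l with _ | x
        · exact absurd ((PySem.Dict.get?_eq_none_iff_contains _ _).mp hx)
            (by simp [hc])
        · simp [PySem.Dict.getD, hx]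
      rw [hc, hget?, pvBuildDict_getD_last classes l hmem]
      simp only [Bool.true_and, Int.toNat_natCast]
      simp
    · have hnone : (pvBuildDict classes).get? l = none := by
        rw [PySem.Dict.get?_eq_none_iff_contains]
        simpa using hc
      rw [Bool.not_eq_true] at hc
      rw [hc, hnone]
      simp
  · rw [List.getElem?_eq_none (by omega), List.getElem?_eq_none
      (by rw [PySem.List.length_pyRange_one, hsize]; omega)]
    simp
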